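-- pv_equiv track=rewrite | github.com/C0jae/Coding-Pratice | src/study/DFSBFS/P05_괄호변환.py | balaced_index
-- ===== SOURCE A (Python) =====
-- def balaced_index(p):
--     count = 0
--
--     for i in range(len(p)):
--         if p[i] == "(":
--             count += 1
--
--         else:
--             count -= 1
--
--         if count == 0:
--             return i
-- ===== SOURCE B (Python) =====
-- def balaced_index(p):
--     sums = []
--     total = 0
--     for c in p:
--         total += 1 if c == "(" else -1
--         sums.append(total)
--     try:
--         return sums.index(0)
--     except ValueError:
--         return None
-- ===== Notes on version B (the rewrite author's own statement) =====
-- stated objective: alternative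
-- what changed: B first materialises the full prefix-balance table in one pass, then finds the answer with a separate list.index(0) search (ValueError -> None), instead of A's single loop interleaving the counter update with the zero test and early return.
import Mathlib
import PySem

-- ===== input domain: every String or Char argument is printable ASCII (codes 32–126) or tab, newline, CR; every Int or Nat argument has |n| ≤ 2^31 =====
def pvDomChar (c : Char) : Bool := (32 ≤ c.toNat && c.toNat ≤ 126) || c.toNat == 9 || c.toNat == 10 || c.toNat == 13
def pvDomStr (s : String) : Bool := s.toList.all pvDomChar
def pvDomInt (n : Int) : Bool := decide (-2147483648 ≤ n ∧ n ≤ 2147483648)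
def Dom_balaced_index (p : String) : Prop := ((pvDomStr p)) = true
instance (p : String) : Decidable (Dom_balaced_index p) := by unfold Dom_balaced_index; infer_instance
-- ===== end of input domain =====

-- B builds the full prefix-balance table first and then searches it with list.index; A interleaves counter and zero-test in one loop. Return value only; both total.

-- ===== PORT A =====
-- A's loop over range(len(p)) with counter and early return, as structural recursion carrying (count, i).
def balacedGoA : List Char → Int → Int → Option Int
  | [], _, _ => none
  | c :: rest, count, i =>
      let count' := if c = '(' then count + 1 else count - 1
      if count' = 0 then some i else balacedGoA rest count' (i + 1)

def balaced_index (p : String) : Option Int := balacedGoA p.toList 0 0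

-- ===== PORT B =====
-- first pass: the prefix-balance table (sums.append(total) in Source B)
def balacedSums : List Char → Int → List Int
  | [], _ => []
  | c :: rest, total =>
      let t := total + (if c = '(' then 1 else -1)
      t :: balacedSums rest t

-- second pass: sums.index(0), ValueError -> None
def balaced_index_alt (p : String) : Option Int :=
  (PySem.List.index? (balacedSums p.toList 0) 0).map (fun n => (n : Int))

-- ===== PRECONDITION & SPEC =====
def Spec_balaced_index (p : String) (out : Option Int) : Prop := out = balaced_index_alt p
instance (p : String) (out : Option Int) : Decidable (Spec_balaced_index p out) := by unfold Spec_balaced_index; infer_instance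

-- ===== CLAIM (what is proved, stated in full; the proofs are below) =====
def Claim_equal_balaced_index : Prop := ∀ (p : String), Dom_balaced_index p → Spec_balaced_index p (balaced_index p)

-- ===== LEMMAS AND PROOFS =====
theorem balacedGo_eq (l : List Char) : ∀ (count i : Int),
    balacedGoA l count i = (PySem.List.index? (balacedSums l count) 0).map (fun n => i + n) := by
  induction l with
  | nil => intro count i; simp [balacedGoA, balacedSums, PySem.List.index?]
  | cons c rest ih =>
    intro count i
    simp only [balacedGoA, balacedSums]
    have hδ : count + (if c = '(' then 1 else -1) = if c = '(' then count + 1 else count - 1 := by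
      split <;> ring
    rw [hδ]
    by_cases h : (if c = '(' then count + 1 else count - 1) = 0
    · rw [if_pos h, h, PySem.List.index?_cons_self]; simp
    · rw [if_neg h, PySem.List.index?_cons_of_ne _ h, ih]
      cases PySem.List.index? (balacedSums rest (if c = '(' then count + 1 else count - 1)) 0 with
      | none => simp
      | some k => simp; push_cast; ring

-- ===== VERDICT (by name: the statement is the Claim_ definition above) =====
theorem balaced_index_spec : Claim_equal_balaced_index := by
  intro p _
  unfold Spec_balaced_index balaced_index balaced_index_alt
  rw [balacedGo_eq]
  cases PySem.List.index? (balacedSums p.toList 0) 0 <;> simp
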